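-- pv_equiv track=rewrite | github.com/oss-materijali/vjezbe | SRC103-UUP/I.Kolokvij/I.kolokvij_warmup/vj903.py | function
-- ===== SOURCE A (Python) =====
-- def function(x, y):
--     if x == 0 and y == 0:
--         return 0
--
--     if x % 10 != y % 10:
--         difference = 1
--     else:
--         difference = 0
--
--     return difference + function(x // 10, y // 10)
-- ===== SOURCE B (Python) =====
-- def function(x, y):
--     dx = []
--     while x != 0:
--         dx.append(x % 10)
--         x //= 10
--     dy = []
--     while y != 0:
--         dy.append(y % 10)
--         y //= 10
--     n = max(len(dx), len(dy))
--     dx += [0] * (n - len(dx))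
--     dy += [0] * (n - len(dy))
--     return sum(1 for a, b in zip(dx, dy) if a != b)
-- ===== Notes on version B (the rewrite author's own statement) =====
-- stated objective: alternative
-- what changed: Instead of a simultaneous recursion on both numbers, B first materialises each number's digit list (least-significant first), zero-pads them to equal length and counts mismatching positions of the zipped lists.
import Mathlib
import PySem

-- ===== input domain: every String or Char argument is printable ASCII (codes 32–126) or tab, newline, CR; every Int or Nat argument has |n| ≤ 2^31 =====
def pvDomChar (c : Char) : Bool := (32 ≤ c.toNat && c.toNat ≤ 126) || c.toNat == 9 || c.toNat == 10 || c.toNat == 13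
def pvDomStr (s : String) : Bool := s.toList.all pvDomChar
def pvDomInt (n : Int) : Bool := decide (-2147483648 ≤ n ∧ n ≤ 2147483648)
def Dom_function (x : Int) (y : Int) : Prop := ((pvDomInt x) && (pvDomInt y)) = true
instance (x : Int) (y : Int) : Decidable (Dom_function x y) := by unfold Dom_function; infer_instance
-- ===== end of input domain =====

-- B builds each number's digit list, zero-pads the lists to equal length and counts mismatching
-- zipped positions, instead of A's simultaneous recursion on both numbers.

-- ===== PORT A =====
-- fuel only guarantees totality in Lean; on the admitted inputs (x,y ≥ 0) it is never exhausted
def functionGo : Nat → Int → Int → Int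
  | 0, _, _ => 0
  | f + 1, x, y =>
    if x = 0 ∧ y = 0 then 0
    else (if PySem.Int.mod x 10 ≠ PySem.Int.mod y 10 then (1 : Int) else 0)
         + functionGo f (PySem.Int.floordiv x 10) (PySem.Int.floordiv y 10)

def function (x : Int) (y : Int) : Int := functionGo (x.natAbs + y.natAbs + 1) x y

-- ===== PORT B =====
-- the digit-extraction while-loop of Source B (appends x % 10, then x //= 10), with a fuel guard
def digitsGo : Nat → Int → List Int → List Int
  | 0, _, acc => acc
  | f + 1, x, acc =>
    if x ≠ 0 then digitsGo f (PySem.Int.floordiv x 10) (acc ++ [PySem.Int.mod x 10])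
    else acc

def function_alt (x : Int) (y : Int) : Int :=
  let dx := digitsGo (x.natAbs + 1) x []
  let dy := digitsGo (y.natAbs + 1) y []
  let n := max dx.length dy.length
  let dx := dx ++ List.replicate (n - dx.length) (0 : Int)
  let dy := dy ++ List.replicate (n - dy.length) (0 : Int)
  ((dx.zip dy).filter (fun p => p.1 ≠ p.2)).length

-- ===== PRECONDITION & SPEC =====
-- Pre_ excludes negative arguments: there Python A never reaches its base case (x // 10 stays at -1)
-- and raises RecursionError, and B's digit-extraction while-loop likewise never terminates.
def Pre_function (x : Int) (y : Int) : Prop := 0 ≤ x ∧ 0 ≤ y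
instance (x : Int) (y : Int) : Decidable (Pre_function x y) := by unfold Pre_function; infer_instance
def pvWitness_function : Int × Int := (12, 45)

def Spec_function (x : Int) (y : Int) (out : Int) : Prop := out = function_alt x y
instance (x : Int) (y : Int) (out : Int) : Decidable (Spec_function x y out) := by unfold Spec_function; infer_instance

-- ===== CLAIM (what is proved, stated in full; the proofs are below) =====
def Claim_equal_function : Prop := ∀ (x : Int) (y : Int), Dom_function x y → Pre_function x y → Spec_function x y (function x y)

-- ===== LEMMAS AND PROOFS =====

-- proof-only helper: the digit list in direct (non-accumulator) form
def dS : Nat → Int → List Int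
  | 0, _ => []
  | f + 1, x => if x = 0 then [] else PySem.Int.mod x 10 :: dS f (PySem.Int.floordiv x 10)

-- proof-only helper: mismatch count with implicit zero padding, structural on both lists
def cd : List Int → List Int → Int
  | [], [] => 0
  | [], b :: bs => (if (0 : Int) ≠ b then 1 else 0) + cd [] bs
  | a :: as, [] => (if a ≠ (0 : Int) then 1 else 0) + cd as []
  | a :: as, b :: bs => (if a ≠ b then 1 else 0) + cd as bs

theorem dS_zero (f : Nat) : dS f 0 = [] := by cases f <;> simp [dS]

theorem digitsGo_eq (f : Nat) : ∀ (x : Int) (acc : List Int),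
    digitsGo f x acc = acc ++ dS f x := by
  induction f with
  | zero => intro x acc; simp [digitsGo, dS]
  | succ f ih =>
    intro x acc
    by_cases h : x = 0
    · simp [digitsGo, dS, h]
    · simp [digitsGo, dS, h, ih]

theorem mod_zero_ten : PySem.Int.mod 0 10 = 0 := by decide
theorem floordiv_zero_ten : PySem.Int.floordiv 0 10 = 0 := by decide

theorem functionGo_eq_cd (f : Nat) : ∀ (x y : Int),
    functionGo f x y = cd (dS f x) (dS f y) := by
  induction f with
  | zero => intro x y; simp [functionGo, dS, cd]
  | succ f ih =>
    intro x y
    by_cases hx : x = 0 <;> by_cases hy : y = 0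
    · simp [functionGo, dS, cd, hx, hy]
    · simp only [functionGo, dS, if_neg (by tauto : ¬(x = 0 ∧ y = 0)), if_pos hx, if_neg hy,
        hx, mod_zero_ten, floordiv_zero_ten, ih, dS_zero]
      rcases hd : dS f (PySem.Int.floordiv y 10) with _ | ⟨b, bs⟩ <;>
        simp [cd, ne_comm, hy]
    · simp only [functionGo, dS, if_neg (by tauto : ¬(x = 0 ∧ y = 0)), if_pos hy, if_neg hx,
        hy, mod_zero_ten, floordiv_zero_ten, ih, dS_zero]
      rcases hd : dS f (PySem.Int.floordiv x 10) with _ | ⟨a, as⟩ <;>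
        simp [cd, hx]
    · simp [functionGo, dS, cd, hx, hy, ih]

-- appending zeros does not change the padded mismatch count
theorem cd_nil_rep (k : Nat) : cd [] (List.replicate k 0) = 0 := by
  induction k with
  | zero => simp [cd]
  | succ k ih => simp [List.replicate, cd, ih]

theorem cd_rep_nil (k : Nat) : cd (List.replicate k 0) [] = 0 := by
  induction k with
  | zero => simp [cd]
  | succ k ih => simp [List.replicate, cd, ih]

theorem cd_nil_append_rep (bs : List Int) (k : Nat) :
    cd [] (bs ++ List.replicate k 0) = cd [] bs := by
  induction bs with
  | nil => simpa [cd] using cd_nil_rep k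
  | cons b bs ih => simp [cd, ih]

theorem cd_append_rep_nil (as : List Int) (k : Nat) :
    cd (as ++ List.replicate k 0) [] = cd as [] := by
  induction as with
  | nil => simpa [cd] using cd_rep_nil k
  | cons a as ih => simp [cd, ih]

theorem cd_rep_left (j : Nat) : ∀ (cs : List Int), cd (List.replicate j 0) cs = cd [] cs := by
  induction j with
  | zero => intro cs; rfl
  | succ j ih =>
    intro cs
    rcases cs with _ | ⟨c, cs⟩
    · simpa [List.replicate, cd] using cd_rep_nil j
    · simp [List.replicate, cd, ih]

theorem cd_pad (as : List Int) : ∀ (bs : List Int) (j k : Nat),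
    cd (as ++ List.replicate j 0) (bs ++ List.replicate k 0) = cd as bs := by
  induction as with
  | nil =>
    intro bs j k
    simp only [List.nil_append]
    rw [cd_rep_left, cd_nil_append_rep]
  | cons a as ih =>
    intro bs j k
    rcases bs with _ | ⟨b, bs⟩
    · rcases k with _ | k
      · simpa using cd_append_rep_nil (a :: as) j
      · simpa [List.replicate, cd] using congrArg (fun t => (if a ≠ (0:Int) then (1:Int) else 0) + t) (ih [] j k)
    · simp [cd, ih]

-- equal-length zipped mismatch count equals cd
theorem cnt_zip_eq_cd (as : List Int) : ∀ (bs : List Int), as.length = bs.length →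
    (((as.zip bs).filter (fun p => p.1 ≠ p.2)).length : Int) = cd as bs := by
  induction as with
  | nil =>
    intro bs h
    have : bs = [] := by simpa using (List.length_eq_zero_iff.mp h.symm)
    simp [this, cd]
  | cons a as ih =>
    intro bs h
    rcases bs with _ | ⟨b, bs⟩
    · simp at h
    · have h' : as.length = bs.length := by simpa using h
      by_cases hab : a = b <;> simp [cd, hab, ← ih bs h'] <;> ring

-- dS is independent of the fuel once the fuel exceeds the (nonnegative) number
theorem floordiv_lt (x : Int) (hx : 0 < x) :
    (PySem.Int.floordiv x 10).natAbs < x.natAbs ∧ 0 ≤ PySem.Int.floordiv x 10 := by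
  have h2 : PySem.Int.floordiv x 10 < x :=
    (PySem.Int.floordiv_lt_iff_lt_mul (by norm_num)).mpr (by nlinarith)
  have h1 : 0 ≤ PySem.Int.floordiv x 10 := by
    rw [PySem.Int.floordiv_eq_ediv_of_pos (by norm_num)]
    exact Int.ediv_nonneg (le_of_lt hx) (by norm_num)
  omega

theorem dS_stable (f : Nat) : ∀ (g : Nat) (x : Int), 0 ≤ x → x.natAbs < f → x.natAbs < g →
    dS f x = dS g x := by
  induction f with
  | zero => intro g x _ h; omega
  | succ f ih =>
    intro g x hx hf hg
    rcases g with _ | g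
    · omega
    by_cases h0 : x = 0
    · simp [dS, h0]
    · have hpos : 0 < x := lt_of_le_of_ne hx (Ne.symm h0)
      obtain ⟨hlt, hnn⟩ := floordiv_lt x hpos
      simp only [dS, if_neg h0]
      rw [ih g (PySem.Int.floordiv x 10) hnn (by omega) (by omega)]

-- ===== VERDICT (by name: the statement is the Claim_ definition above) =====
theorem function_spec : Claim_equal_function := by
  intro x y _ hpre
  obtain ⟨hx, hy⟩ := hpre
  show function x y = function_alt x y
  unfold function function_alt
  simp only [digitsGo_eq, List.nil_append]
  rw [functionGo_eq_cd,
    dS_stable (x.natAbs + y.natAbs + 1) (x.natAbs + 1) x hx (by omega) (by omega),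
    dS_stable (x.natAbs + y.natAbs + 1) (y.natAbs + 1) y hy (by omega) (by omega)]
  set as := dS (x.natAbs + 1) x with has
  set bs := dS (y.natAbs + 1) y with hbs
  have hlen : (as ++ List.replicate (max as.length bs.length - as.length) (0:Int)).length
      = (bs ++ List.replicate (max as.length bs.length - bs.length) (0:Int)).length := by
    simp only [List.length_append, List.length_replicate]; omega
  rw [← cd_pad as bs (max as.length bs.length - as.length) (max as.length bs.length - bs.length)]
  exact (cnt_zip_eq_cd _ _ hlen).symm
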